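-- pv_equiv track=rewrite | github.com/dshoynazarova-maker/python-basics-course | week6assignment.py | find_top_earning_event
-- ===== SOURCE A (Python) =====
-- def find_top_earning_event(events):
--     top_revenue = -1
--     top_event_id = ""
--     for event_id, _, _, revenue in events:
--         if revenue > top_revenue:
--             top_revenue = revenue
--             top_event_id = event_id
--         elif revenue == top_revenue:
--             if event_id < top_event_id:
--                 top_event_id = event_id
--     return top_event_id
-- ===== SOURCE B (Python) =====
-- def find_top_earning_event(events):
--     # Two staged passes: highest revenue first, then the smallest id among its events.
--     if not events:
--         return ""
--     top = max(r for _, _, _, r in events)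
--     return min(eid for eid, _, _, r in events if r == top)
-- ===== Notes on version B (the rewrite author's own statement) =====
-- stated objective: simpler
-- what changed: Replaces A's single accumulator loop over (top_revenue, top_event_id) with two staged built-in passes: max revenue first, then min id among the events reaching it.
-- intended difference: On non-empty lists whose revenues are all <= -1 (and no highest-revenue event has an empty id), A's -1/'' sentinel swallows every event and A returns '' as if there were no events, while B returns the smallest id among the highest-revenue events, which is the intended top-earning event. — e.g. on find_top_earning_event([("e1", "x", "y", -5)]): A returns "", B returns "e1"
import Mathlib
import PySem

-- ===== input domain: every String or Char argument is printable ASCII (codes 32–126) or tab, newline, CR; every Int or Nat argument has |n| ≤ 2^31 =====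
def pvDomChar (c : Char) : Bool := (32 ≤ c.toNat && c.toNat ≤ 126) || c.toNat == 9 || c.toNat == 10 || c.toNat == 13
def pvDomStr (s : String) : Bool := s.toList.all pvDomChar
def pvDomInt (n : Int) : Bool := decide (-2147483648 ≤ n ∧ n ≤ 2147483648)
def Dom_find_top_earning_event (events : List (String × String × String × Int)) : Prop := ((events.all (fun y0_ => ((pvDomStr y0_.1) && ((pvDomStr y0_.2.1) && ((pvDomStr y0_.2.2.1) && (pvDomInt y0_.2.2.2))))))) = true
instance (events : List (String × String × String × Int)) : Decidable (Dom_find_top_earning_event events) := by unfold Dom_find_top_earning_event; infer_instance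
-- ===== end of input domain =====

-- B replaces A's accumulator loop by two staged passes (max revenue, then min id among its
-- events); on non-empty all-negative-revenue input A's -1/"" sentinel makes it return "" —
-- B returns the actual top event's id there (stated as the intended difference D_ below).

-- ===== PORT A =====
-- A: one pass keeping the running (top_revenue, top_event_id) state, as in the Python loop.
def pvStepA (st : Int × String) (e : String × String × String × Int) : Int × String :=
  if e.2.2.2 > st.1 then (e.2.2.2, e.1)
  else if e.2.2.2 = st.1 then (if e.1 < st.2 then (st.1, e.1) else st)
  else st

def find_top_earning_event (events : List (String × String × String × Int)) : String :=
  (events.foldl pvStepA (-1, "")).2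

-- ===== PORT B =====
-- B: empty guard, then max() over the revenues, then min() over the ids of the events
-- whose revenue equals that maximum.
def find_top_earning_event_alt (events : List (String × String × String × Int)) : String :=
  if events = [] then ""
  else
    match PySem.List.max? (events.map (fun e => e.2.2.2)) (fun r => r) with
    | none => ""
    | some top =>
      match PySem.List.min? ((events.filter (fun e => e.2.2.2 == top)).map (fun e => e.1)) (fun i => i) with
      | none => ""
      | some i => i

-- ===== PRECONDITION & SPEC =====
-- On non-empty lists where every revenue is <= -1 and no highest-revenue event has the empty
-- id, A returns its "" sentinel as if there were no events, while B returns the smallest id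
-- among the highest-revenue events, which is the intended top-earning event.
def D_find_top_earning_event (events : List (String × String × String × Int)) : Prop :=
  events ≠ [] ∧ (∀ e ∈ events, e.2.2.2 ≤ -1) ∧
    ∀ e ∈ events, (∀ f ∈ events, f.2.2.2 ≤ e.2.2.2) → e.1 ≠ ""
instance (events : List (String × String × String × Int)) : Decidable (D_find_top_earning_event events) := by unfold D_find_top_earning_event; infer_instance

def Spec_find_top_earning_event (events : List (String × String × String × Int)) (out : String) : Prop := ¬ D_find_top_earning_event events → out = find_top_earning_event_alt events
instance (events : List (String × String × String × Int)) (out : String) : Decidable (Spec_find_top_earning_event events out) := by unfold Spec_find_top_earning_event; infer_instance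

def pvDiffWitness_find_top_earning_event : (List (String × String × String × Int)) := [("e1", "x", "y", -5)]
def pvDiffWitnessOut_find_top_earning_event : String × String := ("", "e1")

-- ===== CLAIM (what is proved, stated in full; the proofs are below) =====
def Claim_unchanged_find_top_earning_event : Prop := ∀ (events : List (String × String × String × Int)), Dom_find_top_earning_event events → Spec_find_top_earning_event events (find_top_earning_event events)
def Claim_changed_find_top_earning_event : Prop := Dom_find_top_earning_event (pvDiffWitness_find_top_earning_event) ∧ D_find_top_earning_event (pvDiffWitness_find_top_earning_event) ∧ find_top_earning_event (pvDiffWitness_find_top_earning_event) = pvDiffWitnessOut_find_top_earning_event.1 ∧ find_top_earning_event_alt (pvDiffWitness_find_top_earning_event) = pvDiffWitnessOut_find_top_earning_event.2 ∧ pvDiffWitnessOut_find_top_earning_event.1 ≠ pvDiffWitnessOut_find_top_earning_event.2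
def Claim_exact_find_top_earning_event : Prop := ∀ (events : List (String × String × String × Int)), Dom_find_top_earning_event events → D_find_top_earning_event events → find_top_earning_event events ≠ find_top_earning_event_alt events

-- ===== LEMMAS AND PROOFS =====
-- 'pvGood p q': p is at least as good a (revenue, id) pair as q under A's rule
-- (strictly higher revenue, or equal revenue and an id that is ≤).
def pvGood (p q : Int × String) : Prop := q.1 < p.1 ∨ (q.1 = p.1 ∧ p.2 ≤ q.2)

theorem pvGood_refl (p : Int × String) : pvGood p p := Or.inr ⟨rfl, le_refl _⟩

theorem pvGood_trans {p q r : Int × String} (h1 : pvGood p q) (h2 : pvGood q r) : pvGood p r := by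
  rcases h1 with h1 | ⟨h1, h1'⟩ <;> rcases h2 with h2 | ⟨h2, h2'⟩
  · exact Or.inl (by omega)
  · exact Or.inl (by omega)
  · exact Or.inl (by omega)
  · exact Or.inr ⟨by omega, h1'.trans h2'⟩

theorem pvGood_step (st : Int × String) (e : String × String × String × Int) :
    pvGood (pvStepA st e) st ∧ pvGood (pvStepA st e) (e.2.2.2, e.1) := by
  unfold pvStepA pvGood
  split_ifs with h1 h2 h3
  · exact ⟨Or.inl h1, pvGood_refl _⟩
  · exact ⟨Or.inr ⟨rfl, le_of_lt h3⟩, Or.inr ⟨h2, le_refl _⟩⟩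
  · exact ⟨pvGood_refl _, Or.inr ⟨h2, le_of_not_gt h3⟩⟩
  · exact ⟨pvGood_refl _, Or.inl (by omega)⟩

-- A's fold yields a candidate (the seed or one event's pair) that is at least as good as
-- the seed and as every event's pair.
theorem pvFoldA_char (l : List (String × String × String × Int)) :
    ∀ st : Int × String,
      (l.foldl pvStepA st = st ∨ ∃ e ∈ l, l.foldl pvStepA st = (e.2.2.2, e.1)) ∧
      pvGood (l.foldl pvStepA st) st ∧
      ∀ e ∈ l, pvGood (l.foldl pvStepA st) (e.2.2.2, e.1) := by
  induction l with
  | nil => intro st; exact ⟨Or.inl rfl, pvGood_refl st, by simp⟩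
  | cons a t ih =>
    intro st
    have hstep := pvGood_step st a
    obtain ⟨hcand, hgs, hall⟩ := ih (pvStepA st a)
    simp only [List.foldl_cons]
    refine ⟨?_, pvGood_trans hgs hstep.1, ?_⟩
    · rcases hcand with h | ⟨e, he, h⟩
      · by_cases hc : pvStepA st a = st
        · exact Or.inl (h.trans hc)
        · refine Or.inr ⟨a, List.mem_cons_self, ?_⟩
          rw [h]; unfold pvStepA at hc ⊢
          split_ifs at hc ⊢ <;> simp_all
      · exact Or.inr ⟨e, List.mem_cons_of_mem _ he, h⟩
    · intro e he
      rcases List.mem_cons.mp he with rfl | he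
      · exact pvGood_trans hgs hstep.2
      · exact hall e he

theorem pv_not_lt_empty (s : String) : ¬ s < "" := by
  intro h
  rw [String.lt_iff_toList_lt] at h
  simp at h

-- when every revenue is ≤ -1, A's -1/"" seed is never replaced
theorem pvFoldA_neg (l : List (String × String × String × Int))
    (hneg : ∀ e ∈ l, e.2.2.2 ≤ -1) : l.foldl pvStepA (-1, "") = (-1, "") := by
  induction l with
  | nil => rfl
  | cons a t ih =>
    have ha := hneg a List.mem_cons_self
    have hst : pvStepA ((-1 : Int), "") a = (-1, "") := by
      unfold pvStepA
      split_ifs with h1 h2 h3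
      · omega
      · exact absurd h3 (pv_not_lt_empty _)
      · rfl
      · rfl
    simp only [List.foldl_cons, hst]
    exact ih (fun e he => hneg e (List.mem_cons_of_mem _ he))

-- B's two passes, destructured: the maximal revenue 'top' and the minimal winner id 'I',
-- with their membership and extremality facts, and B's result = I.
theorem pvB_char (events : List (String × String × String × Int)) (hev : events ≠ []) :
    ∃ top I,
      find_top_earning_event_alt events = I ∧
      (∀ e ∈ events, e.2.2.2 ≤ top) ∧
      (∃ et ∈ events, et.2.2.2 = top) ∧
      (∃ ew ∈ events, ew.2.2.2 = top ∧ ew.1 = I) ∧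
      (∀ e ∈ events, e.2.2.2 = top → I ≤ e.1) := by
  unfold find_top_earning_event_alt
  rw [if_neg hev]
  rcases hmax : PySem.List.max? (events.map (fun e => e.2.2.2)) (fun r => r) with _ | top
  · exact absurd (by simpa [List.map_eq_nil_iff] using
      (PySem.List.max?_eq_none_iff (xs := events.map (fun e => e.2.2.2)) (key := fun r => r)).mp hmax) hev
  · obtain ⟨et, het, hetrev⟩ := List.mem_map.mp (PySem.List.max?_mem hmax)
    have htopmax := PySem.List.max?_isMax hmax
    rcases hmin : PySem.List.min? ((events.filter (fun e => e.2.2.2 == top)).map (fun e => e.1)) (fun i => i) with _ | I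
    · exfalso
      have hmem : et ∈ events.filter (fun e => e.2.2.2 == top) :=
        List.mem_filter.mpr ⟨het, by simp [hetrev]⟩
      have := List.mem_map_of_mem (f := fun e => (e : String × String × String × Int).1) hmem
      rw [(PySem.List.min?_eq_none_iff _ _).mp hmin] at this
      simp at this
    · obtain ⟨ew, hwmem, hwid⟩ := List.mem_map.mp (PySem.List.min?_mem hmin)
      obtain ⟨hwev, hwrev⟩ := List.mem_filter.mp hwmem
      have hImin := PySem.List.min?_isMin hmin
      refine ⟨top, I, by simp only [hmax, hmin], fun e he => htopmax _ (List.mem_map_of_mem he), ⟨et, het, hetrev⟩,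
        ⟨ew, hwev, by simpa using hwrev, hwid⟩, fun e he hetop => ?_⟩
      exact hImin _ (List.mem_map_of_mem (List.mem_filter.mpr ⟨he, by simp [hetop]⟩))

-- ===== VERDICT (by name: the statement is the Claim_ definition above) =====
theorem find_top_earning_event_spec : Claim_unchanged_find_top_earning_event := by
  intro events _ hnd
  by_cases hev : events = []
  · subst hev; rfl
  obtain ⟨top, I, hB, htopmax, ⟨et, het, hetrev⟩, ⟨ew, hwev, hwrev, hwid⟩, hImin⟩ := pvB_char events hev
  rw [hB]
  by_cases hpos : ∀ e ∈ events, e.2.2.2 ≤ -1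
  · -- all revenues ≤ -1 but ¬D_: some top-revenue event has the empty id, so B is "" too
    unfold D_find_top_earning_event at hnd
    push Not at hnd
    obtain ⟨em, hmem, hmmax, hmid⟩ := hnd hev hpos
    have hmtop : em.2.2.2 = top := by
      have h2 := hmmax et het
      rw [hetrev] at h2
      exact le_antisymm (htopmax _ hmem) h2
    have hIe : I ≤ "" := hmid ▸ hImin _ hmem hmtop
    have hI : I = "" := le_antisymm hIe (le_of_not_gt (pv_not_lt_empty I))
    unfold find_top_earning_event
    rw [pvFoldA_neg events hpos, hI]
  · -- some revenue > -1: A's fold lands on a top-revenue event with the minimal id, i.e. on I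
    push Not at hpos
    obtain ⟨e0, he0, hge⟩ := hpos
    have htoppos : (-1 : Int) < top := lt_of_lt_of_le hge (htopmax _ he0)
    obtain ⟨hcand, -, hall⟩ := pvFoldA_char events ((-1 : Int), "")
    unfold find_top_earning_event
    set F := events.foldl pvStepA ((-1 : Int), "") with hF
    have hFet := hall et het
    rw [hetrev] at hFet
    have hF1 : top ≤ F.1 := by
      rcases hFet with h | ⟨h, -⟩
      · exact le_of_lt h
      · exact le_of_eq h
    rcases hcand with hc | ⟨ef, hef, hc⟩
    · rw [hc] at hF1
      exact absurd hF1 (by simpa using htoppos)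
    · have hef2 : ef.2.2.2 = top := le_antisymm (htopmax _ hef) (by rw [hc] at hF1; exact hF1)
      have hIF : I ≤ F.2 := by rw [hc]; exact hImin _ hef hef2
      have hFI : F.2 ≤ I := by
        have h := hall ew hwev
        rw [hwrev, hwid] at h
        rcases h with h | ⟨-, h⟩
        · rw [hc] at h; rw [hef2] at h; exact absurd h (lt_irrefl top)
        · exact h
      exact le_antisymm hFI hIF

theorem find_top_earning_event_changed : Claim_changed_find_top_earning_event := by
  unfold Claim_changed_find_top_earning_event; decide

theorem find_top_earning_event_tight : Claim_exact_find_top_earning_event := by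
  intro events _ hD hAB
  obtain ⟨hev, hneg, hids⟩ := hD
  obtain ⟨top, I, hB, htopmax, ⟨et, het, hetrev⟩, ⟨ew, hwev, hwrev, hwid⟩, -⟩ := pvB_char events hev
  have hwmax : ∀ f ∈ events, f.2.2.2 ≤ ew.2.2.2 := by
    intro f hf; rw [hwrev]; exact htopmax _ hf
  have hwne : ew.1 ≠ "" := hids ew hwev hwmax
  have hA : find_top_earning_event events = "" := by
    unfold find_top_earning_event
    rw [pvFoldA_neg events hneg]
  rw [hA, hB, ← hwid] at hAB
  exact hwne hAB.symm
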